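-- pv_equiv track=rewrite | github.com/skdud5126/Algo | algo/remake_prac/반복문자/1.py | continuous_password
-- ===== SOURCE A (Python) =====
-- def continuous_password(password):   # 연속문자 탐색 함수
--     cnt = 1
--     total = 0
--
--     res = list(map(lambda ch : ord(ch), password))   # ord 문자열을 숫자로 바꿔주는 내장함수
--
--     for i in range(1, len(res)):
--         if res[i] == res[i - 1] + 1:
--             cnt += 1
--         else:
--             if cnt > 1:
--                 total += cnt
--             cnt = 1
--
--     if cnt > 1:
--         total += cnt
--
--     return total
-- ===== SOURCE B (Python) =====
-- def continuous_password(password):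
--     # diff-list decomposition: scan the list of adjacent ord-differences front to back,
--     # jumping over each maximal run of +1 differences and adding (run length + 1).
--     diffs = [ord(b) - ord(a) for a, b in zip(password, password[1:])]
--     n = len(diffs)
--     total = 0
--     i = 0
--     while i < n:
--         if diffs[i] == 1:
--             j = i
--             while j < n and diffs[j] == 1:
--                 j += 1
--             total += (j - i) + 1
--             i = j
--         else:
--             i += 1
--     return total
-- ===== Notes on version B (the rewrite author's own statement) =====
-- stated objective: alternative
-- what changed: A keeps a running counter with an end-of-run flush while walking character indices; B first builds the list of adjacent ord-differences and then scans it front-to-back, jumping over each maximal run of +1 differences and adding run length + 1.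
import Mathlib
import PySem

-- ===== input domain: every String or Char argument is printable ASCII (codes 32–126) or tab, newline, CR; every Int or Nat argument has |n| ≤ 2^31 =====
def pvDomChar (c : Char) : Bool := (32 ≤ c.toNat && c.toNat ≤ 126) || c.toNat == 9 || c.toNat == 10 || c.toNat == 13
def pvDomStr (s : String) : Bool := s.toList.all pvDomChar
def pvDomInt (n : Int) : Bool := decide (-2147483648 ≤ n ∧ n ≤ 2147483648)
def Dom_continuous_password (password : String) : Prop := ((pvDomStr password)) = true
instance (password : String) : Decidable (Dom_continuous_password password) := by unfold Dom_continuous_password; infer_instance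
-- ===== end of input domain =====

-- B re-decomposes A's cnt/total accumulator loop as front-to-back consumption of maximal +1 runs
-- in the difference list (objective: alternative decomposition, same cost).

-- ===== PORT A =====
def continuous_password (password : String) : Int :=
  let res : List Int := password.toList.map (fun ch => (ch.toNat : Int))
  let st : Int × Int :=
    (PySem.List.pyRange 1 res.length 1).foldl
      (fun (s : Int × Int) i =>
        if PySem.List.pyGetD res i 0 = PySem.List.pyGetD res (i - 1) 0 + 1 then
          (s.1 + 1, s.2)
        else
          (1, if s.1 > 1 then s.2 + s.1 else s.2))
      (1, 0)
  if st.1 > 1 then st.2 + st.1 else st.2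

-- ===== PORT B =====
-- B's inner scan `while j < n and diffs[j] == 1: j += 1`: length of the leading block of
-- 1s in the current suffix of the diff list (= j - i)
def pvRun1 : List Int → Nat
  | [] => 0
  | d :: rest => if d = 1 then pvRun1 rest + 1 else 0

-- B's outer `while i < n:` loop as recursion on the suffix diffs[i:]; advancing i to j
-- is dropping the scanned +1-run (or one non-1 diff) from the suffix
def pvAltGo : List Int → Int → Int
  | [], total => total
  | d :: rest, total =>
    if d = 1 then
      let g := pvRun1 rest
      pvAltGo (rest.drop g) (total + ((g : Int) + 1) + 1)
    else
      pvAltGo rest total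
termination_by ds _ => ds.length
decreasing_by
  · simp
  · simp

def continuous_password_alt (password : String) : Int :=
  let diffs : List Int :=
    (password.toList.zip password.toList.tail).map
      (fun p => (p.2.toNat : Int) - (p.1.toNat : Int))
  pvAltGo diffs 0

-- ===== PRECONDITION & SPEC =====
def Spec_continuous_password (password : String) (out : Int) : Prop := out = continuous_password_alt password
instance (password : String) (out : Int) : Decidable (Spec_continuous_password password out) := by unfold Spec_continuous_password; infer_instance

-- ===== CLAIM (what is proved, stated in full; the proofs are below) =====
def Claim_equal_continuous_password : Prop := ∀ (password : String), Dom_continuous_password password → Spec_continuous_password password (continuous_password password)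

-- ===== LEMMAS AND PROOFS =====

-- A's loop body, expressed on the difference value
def pvStepA (s : Int × Int) (d : Int) : Int × Int :=
  if d = 1 then (s.1 + 1, s.2) else (1, if s.1 > 1 then s.2 + s.1 else s.2)

-- A's fold over range(1, len) is a fold of pvStepA over the zip-difference list
theorem pv_fold_eq_diffs (res : List Int) (init : Int × Int) :
    (PySem.List.pyRange 1 res.length 1).foldl
      (fun (s : Int × Int) i =>
        if PySem.List.pyGetD res i 0 = PySem.List.pyGetD res (i - 1) 0 + 1 then
          (s.1 + 1, s.2)
        else
          (1, if s.1 > 1 then s.2 + s.1 else s.2))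
      init
    = ((res.zip res.tail).map (fun p => p.2 - p.1)).foldl pvStepA init := by
  have hbody : (fun (s : Int × Int) (i : Int) =>
      if PySem.List.pyGetD res i 0 = PySem.List.pyGetD res (i - 1) 0 + 1 then
        (s.1 + 1, s.2)
      else
        (1, if s.1 > 1 then s.2 + s.1 else s.2))
      = fun (s : Int × Int) (i : Int) =>
        pvStepA s (PySem.List.pyGetD res i 0 - PySem.List.pyGetD res (i - 1) 0) := by
    funext s i
    simp only [pvStepA]
    split_ifs with h1 h2 h3 <;> first | rfl | omega
  have hlist : (PySem.List.pyRange 1 res.length 1).map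
      (fun i => PySem.List.pyGetD res i 0 - PySem.List.pyGetD res (i - 1) 0)
      = (res.zip res.tail).map (fun p => p.2 - p.1) := by
    apply List.ext_getElem
    · simp [PySem.List.length_pyRange_one]
    · intro k h1 h2
      have hk : k < res.length - 1 := by
        simpa [PySem.List.length_pyRange_one] using h1
      simp only [List.getElem_map, PySem.List.getElem_pyRange_one, List.getElem_zip]
      have hget1 : PySem.List.pyGetD res (1 + (k : Int)) 0 = res[k + 1]'(by omega) := by
        have hc : (1 + (k : Int)) = ((k + 1 : Nat) : Int) := by push_cast; ring
        rw [hc, PySem.List.pyGetD_natCast, List.getD_eq_getElem]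
      have hget0 : PySem.List.pyGetD res (1 + (k : Int) - 1) 0 = res[k]'(by omega) := by
        have hc : (1 + (k : Int) - 1) = ((k : Nat) : Int) := by ring
        rw [hc, PySem.List.pyGetD_natCast, List.getD_eq_getElem]
      rw [hget1, hget0]
      have htail : res.tail[k]'(by simp [List.length_tail]; omega) = res[k + 1]'(by omega) := by
        simp [List.getElem_tail]
      rw [htail]
  rw [hbody, ← hlist, List.foldl_map]

-- folding pvStepA over a block of 1s just bumps cnt
theorem pv_fold_ones (k : Nat) (c t : Int) :
    (List.replicate k (1 : Int)).foldl pvStepA (c, t) = (c + k, t) := by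
  induction k generalizing c with
  | zero => simp
  | succ n ih => simp [List.replicate_succ, pvStepA, ih]; ring

theorem pvRun1_decomp (ds : List Int) :
    List.take (pvRun1 ds) ds = List.replicate (pvRun1 ds) 1 ∧
      ∀ d, (ds.drop (pvRun1 ds)).head? = some d → d ≠ 1 := by
  induction ds with
  | nil => simp [pvRun1]
  | cons d rest ih =>
    by_cases h : d = 1
    · subst h
      simp only [pvRun1]
      constructor
      · simp [List.replicate_succ, ih.1]
      · simpa using ih.2
    · simp [pvRun1, h]

-- main loop correspondence: fold + final flush = B's run-consuming recursion
theorem pv_finA_eq_altGo (ds : List Int) (total : Int) :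
    (let s := ds.foldl pvStepA (1, total)
     if s.1 > 1 then s.2 + s.1 else s.2) = pvAltGo ds total := by
  induction ds, total using pvAltGo.induct with
  | case1 total => simp [pvAltGo]
  | case2 rest total g ih =>
    obtain ⟨htake, hhead⟩ := pvRun1_decomp rest
    have hunf : pvAltGo (1 :: rest) total
        = pvAltGo (rest.drop g) (total + ((g : Int) + 1) + 1) := by
      rw [pvAltGo]; simp
      rfl
    have hsplit : rest = List.replicate g 1 ++ rest.drop g := by
      conv_lhs => rw [← List.take_append_drop g rest]
      rw [htake]
    have hfold : List.foldl pvStepA (1, total) (1 :: rest)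
        = List.foldl pvStepA (2 + (g : Int), total) (rest.drop g) := by
      conv_lhs => rw [hsplit]
      show List.foldl pvStepA (pvStepA (1, total) 1) (List.replicate g 1 ++ rest.drop g) = _
      rw [List.foldl_append]
      have h2 : pvStepA (1, total) 1 = (2, total) := by simp [pvStepA]
      rw [h2, pv_fold_ones]
    rw [hunf]
    simp only [hfold]
    revert ih hhead
    generalize rest.drop g = D
    intro ih hhead
    cases D with
    | nil =>
      simp only [List.foldl_nil, pvAltGo]
      have hgt : (2 : Int) + (g : Int) > 1 := by omega
      simp only [if_pos hgt]
      ring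
    | cons e r =>
      have he : e ≠ 1 := hhead e rfl
      have hgt : (2 : Int) + (g : Int) > 1 := by omega
      have hstep : pvStepA (2 + (g : Int), total) e = (1, total + (2 + (g : Int))) := by
        simp only [pvStepA, if_neg he, if_pos hgt]
      have hstep' : pvStepA (1, total + ((g : Int) + 1) + 1) e
          = (1, total + ((g : Int) + 1) + 1) := by
        simp [pvStepA, if_neg he]
      rw [← ih]
      simp only [List.foldl_cons, hstep, hstep']
      rw [show total + (2 + (g : Int)) = total + ((g : Int) + 1) + 1 by ring]
  | case3 d rest total h ih =>
    have hunf : pvAltGo (d :: rest) total = pvAltGo rest total := by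
      rw [pvAltGo]; simp [h]
    rw [hunf, ← ih]
    simp [pvStepA, if_neg h]

theorem continuous_password_spec : Claim_equal_continuous_password := by
  intro password _
  show continuous_password password = continuous_password_alt password
  unfold continuous_password continuous_password_alt
  simp only [pv_fold_eq_diffs, pv_finA_eq_altGo]
  congr 1
  rw [← List.map_tail, List.zip_map, List.map_map]
  rfl
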